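-- pv_equiv track=rewrite | github.com/LukeMcClure3/waffleSolver | waffle.py | get_wordles
-- ===== SOURCE A (Python) =====
-- def get_wordles (num):
--     #  0  1  2  3  4
--     #  5  .  6  .  7
--     #  8  9 10 11 12
--     # 13  . 14 .  15
--     # 16 17 18 19 20
--     wordles_i = [[0,1,2,3,4],
--                 [8,9,10,11,12],
--                 [16,17,18,19,20],
--                 [0,5,8,13,16],
--                 [2,6,10,14,18],
--                 [4,7,12,15,20]]
--     rtn = []
--     for wordle_i in wordles_i:
--         if num in wordle_i:
--             rtn .append( wordle_i)
--     return rtn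
-- ===== SOURCE B (Python) =====
-- def get_wordles(num):
--     # Closed-form geometry: decode the cell into grid coordinates (r, c)
--     # (rows of length 5 alternate with rows of length 3, period 8),
--     # then emit the row group and/or column group by formula.
--     if num < 0 or num > 20:
--         return []
--     q, rem = divmod(num, 8)
--     if rem < 5:
--         r, c = 2 * q, rem
--     else:
--         r, c = 2 * q + 1, 2 * (rem - 5)
--     rtn = []
--     if r % 2 == 0:
--         base = 8 * (r // 2)
--         rtn.append([base + j for j in range(5)])
--     if c % 2 == 0:
--         rtn.append([c, 5 + c // 2, 8 + c, 13 + c // 2, 16 + c])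
--     return rtn
-- ===== Notes on version B (the rewrite author's own statement) =====
-- stated objective: alternative
-- what changed: B replaces A's scan over the six hard-coded group lists by closed-form grid geometry: it decodes the cell number into (row, column) coordinates via divmod(num, 8) and constructs the containing row group and/or column group arithmetically.
import Mathlib
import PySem

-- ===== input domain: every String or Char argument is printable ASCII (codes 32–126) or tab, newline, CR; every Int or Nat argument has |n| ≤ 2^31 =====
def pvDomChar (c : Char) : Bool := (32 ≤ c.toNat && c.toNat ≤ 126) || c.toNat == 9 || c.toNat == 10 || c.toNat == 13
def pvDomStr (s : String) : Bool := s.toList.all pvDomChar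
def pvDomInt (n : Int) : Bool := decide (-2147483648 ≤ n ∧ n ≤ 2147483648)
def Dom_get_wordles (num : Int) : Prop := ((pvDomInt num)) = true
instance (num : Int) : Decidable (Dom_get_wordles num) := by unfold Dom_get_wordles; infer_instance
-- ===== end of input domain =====

-- B replaces A's scan over six hard-coded group lists by closed-form grid arithmetic (divmod coordinates, row/column formulas); objective: alternative.


-- ===== PORT A =====
def get_wordles (num : Int) : List (List Int) :=
  let wordles_i : List (List Int) := [[0,1,2,3,4],
                [8,9,10,11,12],
                [16,17,18,19,20],
                [0,5,8,13,16],
                [2,6,10,14,18],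
                [4,7,12,15,20]]
  wordles_i.foldl (fun rtn wordle_i => if num ∈ wordle_i then rtn ++ [wordle_i] else rtn) []

-- ===== PORT B =====
def get_wordles_alt (num : Int) : List (List Int) :=
  if num < 0 ∨ num > 20 then []
  else
    -- q, rem = divmod(num, 8)   (num ≥ 0 here, divisor 8 > 0: floordiv/mod are exact)
    let q := PySem.Int.floordiv num 8
    let rem := PySem.Int.mod num 8
    let (r, c) := if rem < 5 then (2 * q, rem) else (2 * q + 1, 2 * (rem - 5))
    let rtn : List (List Int) := []
    let rtn := if PySem.Int.mod r 2 = 0 then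
        let base := 8 * PySem.Int.floordiv r 2
        rtn ++ [(PySem.List.pyRange 0 5 1).map (fun j => base + j)]
      else rtn
    let rtn := if PySem.Int.mod c 2 = 0 then
        rtn ++ [[c, 5 + PySem.Int.floordiv c 2, 8 + c, 13 + PySem.Int.floordiv c 2, 16 + c]]
      else rtn
    rtn

-- ===== PRECONDITION & SPEC =====
def Spec_get_wordles (num : Int) (out : List (List Int)) : Prop := out = get_wordles_alt num
instance (num : Int) (out : List (List Int)) : Decidable (Spec_get_wordles num out) := by unfold Spec_get_wordles; infer_instance

-- ===== CLAIM (what is proved, stated in full; the proofs are below) =====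
def Claim_equal_get_wordles : Prop := ∀ (num : Int), Dom_get_wordles num → Spec_get_wordles num (get_wordles num)

-- ===== LEMMAS AND PROOFS =====
theorem a_empty_out_of_range (num : Int) (h : num < 0 ∨ 20 < num) :
    get_wordles num = [] := by
  simp only [get_wordles, List.foldl, List.mem_cons, List.not_mem_nil, or_false]
  have : ¬ (num = 0 ∨ num = 1 ∨ num = 2 ∨ num = 3 ∨ num = 4) := by omega
  rw [if_neg this]
  have : ¬ (num = 8 ∨ num = 9 ∨ num = 10 ∨ num = 11 ∨ num = 12) := by omega
  rw [if_neg this]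
  have : ¬ (num = 16 ∨ num = 17 ∨ num = 18 ∨ num = 19 ∨ num = 20) := by omega
  rw [if_neg this]
  have : ¬ (num = 0 ∨ num = 5 ∨ num = 8 ∨ num = 13 ∨ num = 16) := by omega
  rw [if_neg this]
  have : ¬ (num = 2 ∨ num = 6 ∨ num = 10 ∨ num = 14 ∨ num = 18) := by omega
  rw [if_neg this]
  have : ¬ (num = 4 ∨ num = 7 ∨ num = 12 ∨ num = 15 ∨ num = 20) := by omega
  rw [if_neg this]

-- ===== VERDICT (by name: the statement is the Claim_ definition above) =====
theorem get_wordles_spec : Claim_equal_get_wordles := by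
  intro num _
  unfold Spec_get_wordles
  by_cases h : 0 ≤ num ∧ num ≤ 20
  · obtain ⟨h1, h2⟩ := h
    interval_cases num <;> decide
  · rw [a_empty_out_of_range num (by omega)]
    unfold get_wordles_alt
    rw [if_pos (by omega)]
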